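-- pv_equiv track=rewrite | github.com/xichenpan/5W1H-Extraction-Based-on-Semantic-Role-Labeling-in-Improving-Question-Answering-using-Encyclopedia | Func.py | replacedo
-- ===== SOURCE A (Python) =====
-- import copy
--
-- def replacedo(s, one):
--     sen = copy.deepcopy(s)
--     for be_verb in [' did ', ' does ', ' do ', ' done ', ' doing ']:
--         if be_verb in sen:
--             one[0] = be_verb[1:-1]
--             break
--     if ' did ' in sen:
--         sen = sen.replace(' did ', ' finished ')
--     elif ' does ' in sen:
--         sen = sen.replace(' does ', ' finishes ')
--     elif ' do ' in sen:
--         sen = sen.replace(' do ', ' finish ')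
--     elif ' done ' in sen:
--         sen = sen.replace(' done ', ' finished ')
--     elif ' doing ' in sen:
--         sen = sen.replace(' doing ', ' finishing ')
--     return sen
-- ===== SOURCE B (Python) =====
-- import copy
--
-- # Table of (form, replacement); replacement is done by ONE hand-written left-to-right
-- # character scan (prefix match + skip) instead of a chain of str.replace calls.
-- _TABLE = [(' did ', ' finished '), (' does ', ' finishes '), (' do ', ' finish '),
--           (' done ', ' finished '), (' doing ', ' finishing ')]
--
-- def replacedo(s, one):
--     sen = copy.deepcopy(s)
--     for form, repl in _TABLE:
--         if form in sen:
--             one[0] = form.strip()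
--             out = []
--             i = 0
--             while i < len(sen):
--                 if sen.startswith(form, i):
--                     out.append(repl)
--                     i += len(form)
--                 else:
--                     out.append(sen[i])
--                     i += 1
--             return ''.join(out)
--     return sen
-- ===== Notes on version B (the rewrite author's own statement) =====
-- stated objective: alternative
-- what changed: Replaces the record-loop plus five-branch if/elif str.replace chain by one table scan whose replacement is a hand-written single left-to-right character scan (prefix match, emit, skip) building the output incrementally.
-- outside the precondition, e.g. on replacedo(' we do it ', []): A raises IndexError, B raises IndexError
import Mathlib
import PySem

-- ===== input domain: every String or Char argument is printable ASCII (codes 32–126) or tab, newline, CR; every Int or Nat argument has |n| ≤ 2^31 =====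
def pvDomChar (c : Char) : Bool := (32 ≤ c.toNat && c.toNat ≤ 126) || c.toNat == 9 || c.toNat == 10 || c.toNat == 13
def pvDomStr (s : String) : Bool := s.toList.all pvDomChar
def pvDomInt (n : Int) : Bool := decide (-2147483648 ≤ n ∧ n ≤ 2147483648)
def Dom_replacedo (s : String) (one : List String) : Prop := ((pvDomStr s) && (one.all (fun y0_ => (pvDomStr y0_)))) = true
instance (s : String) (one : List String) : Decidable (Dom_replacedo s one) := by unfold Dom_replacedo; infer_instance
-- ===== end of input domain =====

-- B replaces the record-loop plus five-branch str.replace chain by one table scan whose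
-- replacement is a hand-written left-to-right character scan (objective: alternative).
-- Both Pythons also assign one[0] in place on a match; the equivalence proved here is about the RETURN value.

-- ===== PORT A =====
-- A's for-loop only assigns one[0] (an in-place effect invisible in the String return value);
-- the returned string is decided by the if/elif replace chain, transliterated here branch for branch.
def replacedo (s : String) (one : List String) : String :=
  let sen := s
  if PySem.Str.isIn " did " sen then PySem.Str.replace sen " did " " finished "
  else if PySem.Str.isIn " does " sen then PySem.Str.replace sen " does " " finishes "
  else if PySem.Str.isIn " do " sen then PySem.Str.replace sen " do " " finish "
  else if PySem.Str.isIn " done " sen then PySem.Str.replace sen " done " " finished "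
  else if PySem.Str.isIn " doing " sen then PySem.Str.replace sen " doing " " finishing "
  else sen

-- ===== PORT B =====
def pvTable : List (String × String) :=
  [(" did ", " finished "), (" does ", " finishes "), (" do ", " finish "),
   (" done ", " finished "), (" doing ", " finishing ")]

-- Source B's while loop: left-to-right char scan, prefix match emits repl and skips len(form).
-- The [] form case is unreachable (pvTable forms are nonempty; Python would not terminate there).
def pvSubstL (form repl : List Char) : List Char → List Char
  | [] => []
  | c :: rest =>
    match form with
    | [] => c :: rest
    | f :: fs =>
      if List.isPrefixOf (f :: fs) (c :: rest) then repl ++ pvSubstL form repl (rest.drop fs.length)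
      else c :: pvSubstL form repl rest
termination_by l => l.length
decreasing_by
  · simp only [List.length_drop, List.length_cons]; omega
  · simp only [List.length_cons]; omega

def pvScan : List (String × String) → String → String
  | [], sen => sen
  | (form, repl) :: rest, sen =>
    if PySem.Str.isIn form sen then String.ofList (pvSubstL form.toList repl.toList sen.toList)
    else pvScan rest sen

def replacedo_alt (s : String) (one : List String) : String :=
  pvScan pvTable s

-- ===== PRECONDITION & SPEC =====
-- Pre_ excludes exactly the inputs where A raises IndexError: one = [] while some 'do' form occurs in s
-- (A executes one[0] = … there; B raises the same way).
def Pre_replacedo (s : String) (one : List String) : Prop :=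
  one = [] →
    (PySem.Str.isIn " did " s || PySem.Str.isIn " does " s || PySem.Str.isIn " do " s ||
     PySem.Str.isIn " done " s || PySem.Str.isIn " doing " s) = false
instance (s : String) (one : List String) : Decidable (Pre_replacedo s one) := by
  unfold Pre_replacedo; infer_instance

def pvWitness_replacedo : String × List String := (" we do it ", ["x"])

def Spec_replacedo (s : String) (one : List String) (out : String) : Prop := out = replacedo_alt s one
instance (s : String) (one : List String) (out : String) : Decidable (Spec_replacedo s one out) := by unfold Spec_replacedo; infer_instance

-- ===== CLAIM (what is proved, stated in full; the proofs are below) =====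
def Claim_equal_replacedo : Prop := ∀ (s : String) (one : List String), Dom_replacedo s one → Pre_replacedo s one → Spec_replacedo s one (replacedo s one)

-- ===== LEMMAS AND PROOFS =====

-- B's character scan computes exactly CPython's left-to-right non-overlapping replace
-- (which PySem.Chars.replace.go implements fuel-first with a reversed accumulator).
theorem pv_go_eq (f : Char) (fs new : List Char) :
    ∀ (fuel : Nat) (l acc : List Char), l.length ≤ fuel →
      PySem.Chars.replace.go (f :: fs) new fuel l acc = acc.reverse ++ pvSubstL (f :: fs) new l := by
  intro fuel
  induction fuel with
  | zero =>
    intro l acc h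
    have : l = [] := List.eq_nil_of_length_eq_zero (Nat.le_zero.mp h)
    subst this
    simp [PySem.Chars.replace.go, pvSubstL]
  | succ n ih =>
    intro l acc h
    cases l with
    | nil => simp [PySem.Chars.replace.go, pvSubstL]
    | cons c t =>
      rw [PySem.Chars.replace.go]
      by_cases hp : List.isPrefixOf (f :: fs) (c :: t) = true
      · rw [if_pos hp]
        have hlen : (List.drop (f :: fs).length (c :: t)).length ≤ n := by
          simp only [List.length_drop, List.length_cons] at *
          omega
        rw [ih _ _ hlen]
        have : List.drop (f :: fs).length (c :: t) = t.drop fs.length := by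
          simp [List.length_cons]
        rw [this]
        rw [pvSubstL, if_pos hp]
        simp
      · rw [if_neg hp]
        have hlen : t.length ≤ n := by
          simp only [List.length_cons] at h; omega
        rw [ih _ _ hlen]
        rw [pvSubstL, if_neg hp]
        simp

theorem pv_replace_eq (f : Char) (fs new l : List Char) :
    PySem.Chars.replace l (f :: fs) new = pvSubstL (f :: fs) new l := by
  rw [PySem.Chars.replace]
  simp only [List.isEmpty_cons, Bool.false_eq_true, if_false]
  exact pv_go_eq f fs new l.length l [] (le_refl _)

theorem pv_str_replace_eq (s : String) (f : Char) (fs : List Char) (old new : String)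
    (hold : old.toList = f :: fs) :
    PySem.Str.replace s old new = String.ofList (pvSubstL old.toList new.toList s.toList) := by
  rw [PySem.Str.replace, hold, pv_replace_eq]

-- ===== VERDICT (by name: the statement is the Claim_ definition above) =====
theorem replacedo_spec : Claim_equal_replacedo := by
  intro s one _ _
  unfold Spec_replacedo replacedo replacedo_alt pvTable
  simp only [pvScan]
  by_cases h1 : PySem.Str.isIn " did " s = true
  · simp only [h1, if_true]
    exact pv_str_replace_eq s ' ' "did ".toList _ _ rfl
  · simp only [h1, if_false]
    by_cases h2 : PySem.Str.isIn " does " s = true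
    · simp only [h2, if_true]
      exact pv_str_replace_eq s ' ' "does ".toList _ _ rfl
    · simp only [h2, if_false]
      by_cases h3 : PySem.Str.isIn " do " s = true
      · simp only [h3, if_true]
        exact pv_str_replace_eq s ' ' "do ".toList _ _ rfl
      · simp only [h3, if_false]
        by_cases h4 : PySem.Str.isIn " done " s = true
        · simp only [h4, if_true]
          exact pv_str_replace_eq s ' ' "done ".toList _ _ rfl
        · simp only [h4, if_false]
          by_cases h5 : PySem.Str.isIn " doing " s = true
          · simp only [h5, if_true]
            exact pv_str_replace_eq s ' ' "doing ".toList _ _ rfl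
          · simp only [h5, if_false]
            rfl
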